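-- pv_equiv track=rewrite | github.com/tianhm/gptme | gptme/hooks/markdown_validation.py | check_last_line_suspicious
-- ===== SOURCE A (Python) =====
-- def check_last_line_suspicious(content: str) -> tuple[bool, str | None]:
--     """Check if the last line of content has suspicious patterns.
--
--     Args:
--         content: The content to check
--
--     Returns:
--         Tuple of (is_suspicious, pattern_description)
--     """
--     if not content or not content.strip():
--         return False, None
--
--     lines = content.split("\n")
--
--     # Get last non-empty line
--     last_line = None
--     for line in reversed(lines):
--         if line.strip():
--             last_line = line.strip()
--             break
--
--     if not last_line:
--         return False, None
--
--     # Check for suspicious patterns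
--     if last_line.startswith("#"):
--         return True, f"ends with header start: '{last_line}'"
--
--     return False, None
-- ===== SOURCE B (Python) =====
-- def check_last_line_suspicious(content: str) -> tuple[bool, str | None]:
--     """Single right-to-left character scan: no list of lines is built."""
--     if not content or not content.strip():
--         return False, None
--
--     rev = content[::-1]
--     k = 0
--     while rev[k].isspace():  # skip trailing whitespace (a non-space char exists)
--         k += 1
--     chunk = []
--     while k < len(rev) and rev[k] != "\n":  # collect the last non-blank line, reversed
--         chunk.append(rev[k])
--         k += 1
--     last_line = "".join(reversed(chunk)).strip()
--
--     if last_line.startswith("#"):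
--         return True, f"ends with header start: '{last_line}'"
--     return False, None
-- ===== Notes on version B (the rewrite author's own statement) =====
-- stated objective: alternative
-- what changed: A splits the content into a list of lines and scans the reversed list, stripping each candidate line; B never builds a line list: it does a single right-to-left character scan that skips trailing whitespace and collects characters up to the previous newline.
import Mathlib
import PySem

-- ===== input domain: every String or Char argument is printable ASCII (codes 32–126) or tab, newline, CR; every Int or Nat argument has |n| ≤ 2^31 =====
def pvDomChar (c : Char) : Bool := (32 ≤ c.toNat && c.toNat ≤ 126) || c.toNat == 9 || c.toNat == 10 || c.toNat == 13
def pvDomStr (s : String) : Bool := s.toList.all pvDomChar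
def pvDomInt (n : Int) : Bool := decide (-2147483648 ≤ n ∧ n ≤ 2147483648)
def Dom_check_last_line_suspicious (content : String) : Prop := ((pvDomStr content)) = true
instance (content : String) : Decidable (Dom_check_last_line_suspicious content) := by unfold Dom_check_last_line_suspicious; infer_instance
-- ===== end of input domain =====

-- B replaces A's split-into-lines + reversed-line scan by a single right-to-left character
-- scan that never builds a list of lines (objective: alternative).

-- ===== PORT A =====
-- literal port of A: guard, split on "\n", scan the reversed line list for the first
-- line whose strip() is truthy, then the '#' check on that stripped line
def check_last_line_suspicious (content : String) : Bool × Option String :=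
  let cs := content.toList
  if cs = [] ∨ PySem.Chars.strip cs = [] then (false, none)
  else
    let lines := PySem.Chars.splitOn cs ['\n']
    -- "for line in reversed(lines): if line.strip(): last_line = line.strip(); break"
    let last_line : Option (List Char) :=
      (lines.reverse.find? (fun line => !(PySem.Chars.strip line).isEmpty)).map PySem.Chars.strip
    match last_line with
    | none => (false, none)
    | some ll =>
      if ll.isEmpty then (false, none)
      else if PySem.Chars.startswith ll ['#'] then
        (true, some ("ends with header start: '" ++ String.ofList ll ++ "'"))
      else (false, none)

-- ===== PORT B =====
-- literal port of B: guard, reverse the characters, skip whitespace (first while loop =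
-- dropWhile), collect until a newline (second while loop = takeWhile), un-reverse + strip
def check_last_line_suspicious_alt (content : String) : Bool × Option String :=
  let cs := content.toList
  if cs = [] ∨ PySem.Chars.strip cs = [] then (false, none)
  else
    let rev := cs.reverse
    let r := rev.dropWhile PySem.Chars.isspace
    let chunk := r.takeWhile (fun c => c != '\n')
    let last_line := PySem.Chars.strip chunk.reverse
    if PySem.Chars.startswith last_line ['#'] then
      (true, some ("ends with header start: '" ++ String.ofList last_line ++ "'"))
    else (false, none)

-- ===== PRECONDITION & SPEC =====
def Spec_check_last_line_suspicious (content : String) (out : Bool × Option String) : Prop := out = check_last_line_suspicious_alt content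
instance (content : String) (out : Bool × Option String) : Decidable (Spec_check_last_line_suspicious content out) := by unfold Spec_check_last_line_suspicious; infer_instance

-- ===== CLAIM (what is proved, stated in full; the proofs are below) =====
def Claim_equal_check_last_line_suspicious : Prop := ∀ (content : String), Dom_check_last_line_suspicious content → Spec_check_last_line_suspicious content (check_last_line_suspicious content)

-- ===== LEMMAS AND PROOFS =====

-- proof-only model of content.split("\n"): plain structural recursion
def pySplit : List Char → List (List Char)
  | [] => [[]]
  | c :: rest => if c = '\n' then [] :: pySplit rest else (pySplit rest).modifyHead (c :: ·)

-- proof-only "modify the last element"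
def mlast (f : List Char → List Char) : List (List Char) → List (List Char)
  | [] => []
  | [x] => [f x]
  | x :: y :: t => x :: mlast f (y :: t)

theorem pySplit_ne_nil (cs : List Char) : pySplit cs ≠ [] := by
  induction cs with
  | nil => simp [pySplit]
  | cons c rest ih =>
    simp only [pySplit]
    split
    · simp
    · cases h : pySplit rest with
      | nil => exact absurd h ih
      | cons a t => simp [List.modifyHead]

theorem modifyHead_id' (l : List (List Char)) : l.modifyHead (fun x => x) = l := by
  cases l <;> simp [List.modifyHead]

theorem splitOn_go_eq : ∀ (fuel : Nat) (l cur : List Char) (acc : List (List Char)),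
    l.length ≤ fuel →
    PySem.Chars.splitOn.go ['\n'] fuel l cur acc
      = acc.reverse ++ (pySplit l).modifyHead (cur.reverse ++ ·) := by
  intro fuel
  induction fuel with
  | zero =>
    intro l cur acc hl
    have : l = [] := List.length_eq_zero_iff.mp (Nat.le_zero.mp hl)
    subst this
    simp [PySem.Chars.splitOn.go, pySplit]
  | succ fuel ih =>
    intro l cur acc hl
    cases l with
    | nil => simp [PySem.Chars.splitOn.go, pySplit]
    | cons c rest =>
      rw [PySem.Chars.splitOn.go]
      by_cases hc : c = '\n'
      · subst hc
        have hpre : List.isPrefixOf ['\n'] ('\n' :: rest) = true := by simp [List.isPrefixOf]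
        rw [if_pos hpre]
        have hdrop : List.drop (['\n'] : List Char).length ('\n' :: rest) = rest := rfl
        rw [hdrop, ih rest [] _ (by simpa using Nat.le_of_succ_le_succ hl)]
        simp [pySplit, modifyHead_id']
      · have hpre : List.isPrefixOf ['\n'] (c :: rest) = false := by
          simp [List.isPrefixOf]
          exact fun h => hc h.symm
        rw [if_neg (by simp [hpre])]
        rw [ih rest (c :: cur) acc (by simpa using Nat.le_of_succ_le_succ hl)]
        obtain ⟨h, t, hrest⟩ : ∃ h t, pySplit rest = h :: t := by
          cases hp : pySplit rest with
          | nil => exact absurd hp (pySplit_ne_nil rest)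
          | cons a t => exact ⟨a, t, rfl⟩
        simp [pySplit, hc, hrest, List.modifyHead]

theorem splitOn_eq_pySplit (cs : List Char) : PySem.Chars.splitOn cs ['\n'] = pySplit cs := by
  rw [PySem.Chars.splitOn, splitOn_go_eq (cs.length + 1) cs [] [] (by omega)]
  obtain ⟨h, t, hcs⟩ : ∃ h t, pySplit cs = h :: t := by
    cases hp : pySplit cs with
    | nil => exact absurd hp (pySplit_ne_nil cs)
    | cons a t => exact ⟨a, t, rfl⟩
  simp [hcs, List.modifyHead]

theorem modifyHead_append_ne (f : List Char → List Char) (l r : List (List Char))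
    (h : l ≠ []) : (l ++ r).modifyHead f = l.modifyHead f ++ r := by
  cases l with
  | nil => exact absurd rfl h
  | cons a t => simp [List.modifyHead]

theorem mlast_reverse (f : List Char → List Char) : ∀ l : List (List Char),
    (mlast f l).reverse = l.reverse.modifyHead f := by
  intro l
  induction l with
  | nil => simp [mlast]
  | cons x t ih =>
    cases t with
    | nil => simp [mlast, List.modifyHead]
    | cons y t' =>
      simp only [mlast, List.reverse_cons, ih]
      exact (modifyHead_append_ne f _ [x] (by simp)).symm

theorem pySplit_snoc (xs : List Char) (c : Char) :
    pySplit (xs ++ [c]) = if c = '\n' then pySplit xs ++ [[]] else mlast (· ++ [c]) (pySplit xs) := by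
  induction xs with
  | nil =>
    by_cases hc : c = '\n' <;> simp [pySplit, hc, mlast, List.modifyHead]
  | cons a t ih =>
    obtain ⟨h, t', ht⟩ : ∃ h t', pySplit t = h :: t' := by
      cases hp : pySplit t with
      | nil => exact absurd hp (pySplit_ne_nil t)
      | cons x u => exact ⟨x, u, rfl⟩
    by_cases ha : a = '\n'
    · subst ha
      by_cases hc : c = '\n'
      · subst hc
        simp only [List.cons_append, pySplit, ih]
        simp
      · simp only [if_neg hc] at ih ⊢
        simp only [List.cons_append, pySplit, ih, ht]
        cases t' <;> simp [mlast]
    · by_cases hc : c = '\n'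
      · subst hc
        simp only [List.cons_append, pySplit, if_neg ha, ih, ht]
        simp [List.modifyHead]
      · simp only [if_neg hc] at ih ⊢
        simp only [List.cons_append, pySplit, if_neg ha, ih, ht]
        cases t' with
        | nil => simp [mlast, List.modifyHead]
        | cons y u => simp [mlast, List.modifyHead]

theorem strip_eq_nil_imp (l : List Char) (h : PySem.Chars.strip l = []) :
    ∀ x ∈ l, PySem.Chars.isspace x = true := by
  intro x hx
  simp only [PySem.Chars.strip, PySem.Chars.rstrip, PySem.Chars.lstrip] at h
  rw [List.reverse_eq_nil_iff, List.dropWhile_eq_nil_iff] at h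
  have h' : ∀ y ∈ List.dropWhile PySem.Chars.isspace l, PySem.Chars.isspace y = true := by
    intro y hy
    exact h y (by simpa using hy)
  rcases List.mem_append.mp (by rw [List.takeWhile_append_dropWhile] ; exact hx :
      x ∈ List.takeWhile PySem.Chars.isspace l ++ List.dropWhile PySem.Chars.isspace l) with hm | hm
  · exact List.mem_takeWhile_imp hm
  · exact h' x hm

theorem strip_snoc_ws (l : List Char) (c : Char) (hc : PySem.Chars.isspace c = true) :
    PySem.Chars.strip (l ++ [c]) = PySem.Chars.strip l := by
  simp only [PySem.Chars.strip, PySem.Chars.lstrip, PySem.Chars.rstrip]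
  rw [List.dropWhile_append]
  split
  · next hnil =>
    simp [List.dropWhile, hc, List.isEmpty_iff.mp hnil]
  · simp [hc]

theorem strip_ne_nil_of_mem (l : List Char) (c : Char) (hc : PySem.Chars.isspace c = false)
    (hm : c ∈ l) : PySem.Chars.strip l ≠ [] := by
  intro h
  have := strip_eq_nil_imp l h c hm
  rw [hc] at this
  exact Bool.false_ne_true this

-- the main invariant, by induction from the right end of the string
theorem main_inv (cs : List Char) :
    ((pySplit cs).reverse.headD [] = (List.takeWhile (fun c => c != '\n') cs.reverse).reverse)
    ∧ (((pySplit cs).reverse.find? (fun line => !(PySem.Chars.strip line).isEmpty)).map PySem.Chars.strip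
        = if PySem.Chars.strip cs = [] then none
          else some (PySem.Chars.strip
            ((List.takeWhile (fun c => c != '\n')
              (List.dropWhile PySem.Chars.isspace cs.reverse)).reverse))) := by
  induction cs using List.reverseRecOn with
  | nil => simp [pySplit, List.find?, PySem.Chars.strip, PySem.Chars.lstrip, PySem.Chars.rstrip]
  | append_singleton xs c ih =>
    obtain ⟨ih1, ih2⟩ := ih
    obtain ⟨h, t, hR⟩ : ∃ h t, (pySplit xs).reverse = h :: t := by
      cases hp : (pySplit xs).reverse with
      | nil => exact absurd (List.reverse_eq_nil_iff.mp hp) (pySplit_ne_nil xs)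
      | cons a u => exact ⟨a, u, rfl⟩
    by_cases hc : c = '\n'
    · subst hc
      have hrev : (pySplit (xs ++ ['\n'])).reverse = [] :: (pySplit xs).reverse := by
        rw [pySplit_snoc, if_pos rfl]; simp
      have hws : PySem.Chars.isspace '\n' = true := by decide
      constructor
      · simp [hrev]
      · rw [hrev]
        simp only [List.find?]
        have : (!(PySem.Chars.strip ([] : List Char)).isEmpty) = false := by decide
        rw [this, strip_snoc_ws xs '\n' hws]
        simpa [hws] using ih2
    · have hrev : (pySplit (xs ++ [c])).reverse = (h ++ [c]) :: t := by
        rw [pySplit_snoc, if_neg hc, mlast_reverse, hR]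
        simp [List.modifyHead]
      have hbne : (c != '\n') = true := by simp [hc]
      have htake : List.takeWhile (fun c => c != '\n') ((xs ++ [c]).reverse)
          = c :: List.takeWhile (fun c => c != '\n') xs.reverse := by
        simp [hbne]
      constructor
      · rw [hrev, htake]
        simp [← ih1, hR]
      · by_cases hws : PySem.Chars.isspace c = true
        · -- whitespace (but not newline): nothing changes
          have hstrip : PySem.Chars.strip (h ++ [c]) = PySem.Chars.strip h :=
            strip_snoc_ws h c hws
          rw [hrev, strip_snoc_ws xs c hws]
          have hdrop : List.dropWhile PySem.Chars.isspace ((xs ++ [c]).reverse)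
              = List.dropWhile PySem.Chars.isspace xs.reverse := by
            simp [hws]
          rw [hdrop]
          rw [hR] at ih2
          simp only [List.find?] at ih2 ⊢
          rw [hstrip]
          cases hp : (!(PySem.Chars.strip h).isEmpty) with
          | false => rw [hp] at ih2; exact ih2
          | true => rw [hp] at ih2; simpa [hstrip] using ih2
        · -- a non-whitespace character: the last line is found immediately
          have hws' : PySem.Chars.isspace c = false := by
            cases hq : PySem.Chars.isspace c
            · rfl
            · exact absurd hq hws
          have hne : PySem.Chars.strip (h ++ [c]) ≠ [] :=
            strip_ne_nil_of_mem _ c hws' (by simp)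
          have hne' : PySem.Chars.strip (xs ++ [c]) ≠ [] :=
            strip_ne_nil_of_mem _ c hws' (by simp)
          rw [hrev]
          simp only [List.find?]
          have hp : (!(PySem.Chars.strip (h ++ [c])).isEmpty) = true := by
            simp [hne]
          rw [hp, if_neg hne']
          have hdrop : List.dropWhile PySem.Chars.isspace ((xs ++ [c]).reverse)
              = c :: xs.reverse := by
            simp [hws']
          rw [hdrop]
          have : List.takeWhile (fun c => c != '\n') (c :: xs.reverse)
              = c :: List.takeWhile (fun c => c != '\n') xs.reverse := by
            simp [hbne]
          rw [this]
          simp [← ih1, hR]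

-- ===== VERDICT (by name: the statement is the Claim_ definition above) =====
theorem check_last_line_suspicious_spec : Claim_equal_check_last_line_suspicious := by
  intro content _
  unfold Spec_check_last_line_suspicious check_last_line_suspicious check_last_line_suspicious_alt
  set cs := content.toList with hcs
  by_cases hg : cs = [] ∨ PySem.Chars.strip cs = []
  · simp [hg]
  · rw [if_neg hg, if_neg hg]
    have hs : PySem.Chars.strip cs ≠ [] := fun h => hg (Or.inr h)
    have hM := (main_inv cs).2
    rw [if_neg hs] at hM
    simp only [splitOn_eq_pySplit, hM]
    set ll := PySem.Chars.strip
      ((List.takeWhile (fun c => c != '\n')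
        (List.dropWhile PySem.Chars.isspace cs.reverse)).reverse) with hll
    by_cases hempty : ll = []
    · have h1 : PySem.Chars.startswith ([] : List Char) ['#'] = false := by decide
      simp [hempty, h1]
    · simp [hempty]
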